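-- pv_equiv track=rewrite | github.com/OleVikLysne/competitive-programming | lib/graph/python/dinic.py | bfs
-- ===== SOURCE A (Python) =====
-- from collections import deque
--
-- def bfs(source, sink, level, capacity):
--     n = len(capacity)
--     q = deque([source])
--     level[source] = 0
--     while q:
--         v = q.popleft()
--         for u in range(n):
--               cap = capacity[v][u]
--               if cap > 0 and level[u] < 0:
--                   level[u] = level[v] + 1
--                   q.append(u)
--     return level[sink] != -1
-- ===== SOURCE B (Python) =====
-- def bfs(source, sink, level, capacity):
--     n = len(capacity)
--     level[source] = 0
--     reached = [False] * n
--     # seed: expand the source once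
--     for u in range(n):
--         if capacity[source][u] > 0 and level[u] < 0:
--             level[u] = level[source] + 1
--             reached[u] = True
--     # Gauss-Seidel saturation: sweep all vertices until a sweep changes nothing
--     changed = True
--     while changed:
--         changed = False
--         for v in range(n):
--             if reached[v]:
--                 for u in range(n):
--                     if capacity[v][u] > 0 and level[u] < 0:
--                         level[u] = level[v] + 1
--                         reached[u] = True
--                         changed = True
--     return level[sink] != -1
-- ===== Notes on version B (the rewrite author's own statement) =====
-- stated objective: alternative
-- what changed: Replaces the FIFO-queue BFS with a queue-free Gauss-Seidel fixpoint saturation: expand the source once, then repeatedly sweep all vertices, expanding every reached vertex, until one full sweep changes nothing; the set of marked vertices (and hence the returned Bool) is the same reachability closure, though the level values written along the way differ from BFS depths (return value, not the mutation, is what is proved equal).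
-- outside the precondition, e.g. on bfs(0, 0, [-1, -1], [[1, 0], [0]]): A returns True, B returns True; on bfs(0, 0, [-1], [[0, 0], [0, 0]]): A returns True, B returns True
import Mathlib
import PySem

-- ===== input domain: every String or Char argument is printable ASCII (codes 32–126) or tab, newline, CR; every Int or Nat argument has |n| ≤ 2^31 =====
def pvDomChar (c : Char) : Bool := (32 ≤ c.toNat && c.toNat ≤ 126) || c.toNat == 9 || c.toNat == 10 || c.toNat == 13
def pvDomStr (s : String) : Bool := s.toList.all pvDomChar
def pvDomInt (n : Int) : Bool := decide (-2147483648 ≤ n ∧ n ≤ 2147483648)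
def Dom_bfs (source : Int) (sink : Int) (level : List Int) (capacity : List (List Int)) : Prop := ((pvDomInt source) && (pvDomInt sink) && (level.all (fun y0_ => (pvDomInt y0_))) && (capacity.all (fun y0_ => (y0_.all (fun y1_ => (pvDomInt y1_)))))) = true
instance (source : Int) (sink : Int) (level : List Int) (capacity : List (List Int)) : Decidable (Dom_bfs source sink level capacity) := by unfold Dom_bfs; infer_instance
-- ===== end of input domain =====

-- B replaces A's FIFO-queue BFS by a queue-free Gauss-Seidel fixpoint saturation (expand the
-- source once, then sweep all vertices until a sweep changes nothing); the theorems are about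
-- the RETURN value only: both mutate `level` in Python, but B's written level values are
-- saturation depths, not BFS depths (the set of written cells, hence the result, coincides).

-- ===== PORT A =====
-- one inner-loop iteration 'for u in range(n): cap = capacity[v][u]; if cap > 0 and level[u] < 0: ...'
-- state = (level, pending queue); pyGetD/pySetD defaults are never reached under Pre_bfs
def bfsStep (capacity : List (List Int)) (v : Int) (st : List Int × List Int) (u : Int) : List Int × List Int :=
  let cap := PySem.List.pyGetD (PySem.List.pyGetD capacity v []) u 0
  if 0 < cap ∧ PySem.List.pyGetD st.1 u 0 < 0 then
    (PySem.List.pySetD st.1 u (PySem.List.pyGetD st.1 v 0 + 1), st.2 ++ [u])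
  else st

-- 'while q: v = q.popleft(); for u in range(n): …' — fuel only makes the loop total;
-- 2*len(level)+2 bounds the number of pops (each append turns a negative level entry nonnegative)
def bfsLoop (capacity : List (List Int)) (n : Int) : Nat → List Int → List Int → List Int
  | 0, lv, _ => lv
  | _ + 1, lv, [] => lv
  | fuel + 1, lv, v :: q =>
      let st := (PySem.List.pyRange 0 n 1).foldl (bfsStep capacity v) (lv, q)
      bfsLoop capacity n fuel st.1 st.2

def bfs (source : Int) (sink : Int) (level : List Int) (capacity : List (List Int)) : Bool :=
  let n : Int := capacity.length
  let lv := PySem.List.pySetD level source 0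
  let fin := bfsLoop capacity n (2 * level.length + 2) lv [source]
  decide (PySem.List.pyGetD fin sink 0 ≠ -1)

-- ===== PORT B =====
-- seed pass 'for u in range(n): if capacity[source][u] > 0 and level[u] < 0: …' on state (level, reached)
def bfsAltSeed (capacity : List (List Int)) (source : Int) (st : List Int × List Bool) (u : Int) : List Int × List Bool :=
  if 0 < PySem.List.pyGetD (PySem.List.pyGetD capacity source []) u 0 ∧ PySem.List.pyGetD st.1 u 0 < 0 then
    (PySem.List.pySetD st.1 u (PySem.List.pyGetD st.1 source 0 + 1), PySem.List.pySetD st.2 u true)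
  else st

-- innermost 'for u in range(n): if capacity[v][u] > 0 and level[u] < 0: …' on state (level, reached, changed)
def bfsAltInner (capacity : List (List Int)) (v : Int) (st : List Int × List Bool × Bool) (u : Int) : List Int × List Bool × Bool :=
  if 0 < PySem.List.pyGetD (PySem.List.pyGetD capacity v []) u 0 ∧ PySem.List.pyGetD st.1 u 0 < 0 then
    (PySem.List.pySetD st.1 u (PySem.List.pyGetD st.1 v 0 + 1), PySem.List.pySetD st.2.1 u true, true)
  else st

-- 'for v in range(n): if reached[v]: <inner loop>'
def bfsAltSweep (capacity : List (List Int)) (n : Int) (st : List Int × List Bool × Bool) (v : Int) : List Int × List Bool × Bool :=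
  if PySem.List.pyGetD st.2.1 v false = true then (PySem.List.pyRange 0 n 1).foldl (bfsAltInner capacity v) st else st

-- 'changed = True; while changed: changed = False; <sweep>' — fuel only makes the loop total;
-- len(level)+2 bounds the number of sweeps (every changing sweep turns a negative entry nonnegative)
def bfsAltLoop (capacity : List (List Int)) (n : Int) : Nat → List Int → List Bool → List Int
  | 0, lv, _ => lv
  | fuel + 1, lv, r =>
      let st := (PySem.List.pyRange 0 n 1).foldl (bfsAltSweep capacity n) (lv, r, false)
      if st.2.2 then bfsAltLoop capacity n fuel st.1 st.2.1 else st.1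

def bfs_alt (source : Int) (sink : Int) (level : List Int) (capacity : List (List Int)) : Bool :=
  let n : Int := capacity.length
  let lv := PySem.List.pySetD level source 0
  let st := (PySem.List.pyRange 0 n 1).foldl (bfsAltSeed capacity source) (lv, List.replicate capacity.length false)
  let fin := bfsAltLoop capacity n (level.length + 2) st.1 st.2
  decide (PySem.List.pyGetD fin sink 0 ≠ -1)

-- ===== PRECONDITION & SPEC =====
-- Pre_ excludes exactly the raising inputs up to one conservative narrowing: it requires every row to have
-- length ≥ n and len(level) ≥ n, which also excludes ragged/short inputs on which A happens to return
-- because the offending row or cell is never reached (B behaves identically there); the exact no-raise set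
-- depends on reachability and is not closed-form.
def Pre_bfs (source : Int) (sink : Int) (level : List Int) (capacity : List (List Int)) : Prop :=
  capacity.length ≤ level.length ∧
  (∀ row ∈ capacity, capacity.length ≤ row.length) ∧
  PySem.Raise.InRange level.length source ∧
  PySem.Raise.InRange level.length sink ∧
  (0 < capacity.length → PySem.Raise.InRange capacity.length source)
instance (source : Int) (sink : Int) (level : List Int) (capacity : List (List Int)) : Decidable (Pre_bfs source sink level capacity) := by unfold Pre_bfs; infer_instance

def pvWitness_bfs : Int × Int × List Int × List (List Int) := (0, 1, [-1, -1], [[0, 1], [0, 0]])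

def Spec_bfs (source : Int) (sink : Int) (level : List Int) (capacity : List (List Int)) (out : Bool) : Prop := out = bfs_alt source sink level capacity
instance (source : Int) (sink : Int) (level : List Int) (capacity : List (List Int)) (out : Bool) : Decidable (Spec_bfs source sink level capacity out) := by unfold Spec_bfs; infer_instance

-- ===== CLAIM (what is proved, stated in full; the proofs are below) =====
def Claim_equal_bfs : Prop := ∀ (source : Int) (sink : Int) (level : List Int) (capacity : List (List Int)), Dom_bfs source sink level capacity → Pre_bfs source sink level capacity → Spec_bfs source sink level capacity (bfs source sink level capacity)

-- ===== LEMMAS AND PROOFS =====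

-- proof-side abbreviations
def pvRead (lv : List Int) (x : Int) : Int := PySem.List.pyGetD lv x 0
def pvNeg (lv : List Int) : Nat := lv.countP (fun a => decide (a < 0))
def pvCap (capacity : List (List Int)) (v u : Int) : Int :=
  PySem.List.pyGetD (PySem.List.pyGetD capacity v []) u 0

-- the reachability closure both programs saturate: source, plus step through a positive-capacity
-- edge into a vertex whose (post source-write) level entry is negative
inductive pvC (capacity : List (List Int)) (init : List Int) (source : Int) (n : Int) : Int → Prop
  | src : pvC capacity init source n source
  | step {v u : Int} : pvC capacity init source n v → u ∈ PySem.List.pyRange 0 n 1 →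
      0 < pvCap capacity v u → pvRead init u < 0 → pvC capacity init source n u

-- every cell is either untouched or holds a positive value at a closure vertex
def pvDelta (capacity : List (List Int)) (init : List Int) (source n : Int) (lv : List Int) : Prop :=
  ∀ k : Nat, k < init.length →
    lv.getD k 0 = init.getD k 0 ∨
    (1 ≤ lv.getD k 0 ∧ init.getD k 0 < 0 ∧ (k : Int) < n ∧ pvC capacity init source n (k : Int))

def pvClosed (capacity : List (List Int)) (n : Int) (lv : List Int) (w : Int) : Prop :=
  ∀ u ∈ PySem.List.pyRange 0 n 1, 0 < pvCap capacity w u → 0 ≤ pvRead lv u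

def pvJR (init lv : List Int) (r : List Bool) : Prop :=
  ∀ j : Nat, j < r.length → (r.getD j false = true ↔ (init.getD j 0 < 0 ∧ 0 ≤ lv.getD j 0))

-- ---- low-level index lemmas ----
lemma pvIdx_lt (n : Nat) (x : Int) (k : Nat) (h : PySem.List.pyIdx? n x = some k) : k < n := by
  unfold PySem.List.pyIdx? at h
  split_ifs at h <;> simp_all <;> omega

lemma pvIdx_of_nonneg (n : Nat) (x : Int) (h0 : 0 ≤ x) (hn : x < (n : Int)) :
    PySem.List.pyIdx? n x = some x.toNat := by
  unfold PySem.List.pyIdx?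
  split_ifs
  all_goals simp_all

lemma pvRead_some (lv : List Int) (x : Int) (k : Nat) (h : PySem.List.pyIdx? lv.length x = some k) :
    pvRead lv x = lv.getD k 0 := by
  have hk := pvIdx_lt _ _ _ h
  simp [pvRead, PySem.List.pyGetD, PySem.List.pyGet?, h, List.getElem?_eq_getElem hk]

lemma pvRead_none (lv : List Int) (x : Int) (h : PySem.List.pyIdx? lv.length x = none) :
    pvRead lv x = 0 := by
  simp [pvRead, PySem.List.pyGetD, PySem.List.pyGet?, h]

lemma pvRead_nat (lv : List Int) (k : Nat) (hk : k < lv.length) : pvRead lv (k : Int) = lv.getD k 0 :=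
  pvRead_some lv _ k (by rw [pvIdx_of_nonneg _ _ (by omega) (by exact_mod_cast hk)]; simp)

lemma pvSet_some (lv : List Int) (x : Int) (k : Nat) (w : Int) (h : PySem.List.pyIdx? lv.length x = some k) :
    PySem.List.pySetD lv x w = lv.set k w := by
  simp [PySem.List.pySetD, PySem.List.pySet?, h]

lemma pvRead_set (lv : List Int) (u x : Int) (k : Nat) (w : Int)
    (hk : PySem.List.pyIdx? lv.length u = some k) :
    pvRead (lv.set k w) x = if PySem.List.pyIdx? lv.length x = some k then w else pvRead lv x := by
  have _hklen := pvIdx_lt _ _ _ hk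
  have hlen : (lv.set k w).length = lv.length := by simp
  cases hx : PySem.List.pyIdx? lv.length x with
  | none =>
      rw [pvRead_none _ _ (by rw [hlen]; exact hx), pvRead_none _ _ hx]
      simp
  | some j =>
      have hjlen := pvIdx_lt _ _ _ hx
      rw [pvRead_some _ _ j (by rw [hlen]; exact hx), pvRead_some _ _ j hx]
      rw [List.getD_eq_getElem _ _ (by simpa using hjlen), List.getD_eq_getElem _ _ hjlen]
      rw [List.getElem_set]
      by_cases hjk : j = k
      · subst hjk; simp
      · simp [hjk, Ne.symm hjk]

lemma getD_set {α : Type} (d : α) (lv : List α) (k j : Nat) (w : α) (_hk : k < lv.length) (hj : j < lv.length) :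
    (lv.set k w).getD j d = if j = k then w else lv.getD j d := by
  rw [List.getD_eq_getElem _ _ (by simpa using hj), List.getD_eq_getElem _ _ hj, List.getElem_set]
  by_cases h : j = k
  · simp [h]
  · simp [h, Ne.symm h]

lemma pvNeg_set (lv : List Int) (k : Nat) (w : Int) (hk : k < lv.length)
    (hneg : lv.getD k 0 < 0) (hw : 0 ≤ w) :
    pvNeg (lv.set k w) + 1 = pvNeg lv := by
  have he : lv.getD k 0 = lv[k] := List.getD_eq_getElem _ _ hk
  have hlvk : lv[k] < 0 := by rw [← he]; exact hneg
  have hc := List.countP_set (p := fun a : Int => decide (a < 0)) (l := lv) (i := k) (a := w) hk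
  have h3 : 0 < lv.countP (fun a : Int => decide (a < 0)) :=
    List.countP_pos_iff.mpr ⟨lv[k], List.getElem_mem hk, by simpa using hlvk⟩
  rw [if_pos (by simpa using hlvk), if_neg (by simp; omega)] at hc
  unfold pvNeg
  omega

lemma pvRead_setD_self (lv : List Int) (i : Int) : pvRead (PySem.List.pySetD lv i 0) i = 0 := by
  cases hx : PySem.List.pyIdx? lv.length i with
  | none =>
      have : PySem.List.pySetD lv i 0 = lv := by simp [PySem.List.pySetD, PySem.List.pySet?, hx]
      rw [this, pvRead_none _ _ hx]
  | some k =>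
      rw [pvSet_some _ _ _ _ hx, pvRead_set _ _ _ _ _ hx]
      simp [hx]

lemma length_setD (lv : List Int) (i w : Int) : (PySem.List.pySetD lv i w).length = lv.length := by
  cases hx : PySem.List.pyIdx? lv.length i with
  | none => simp [PySem.List.pySetD, PySem.List.pySet?, hx]
  | some k => rw [pvSet_some _ _ _ _ hx]; simp

lemma pvRange_mem (n u : Int) (h : u ∈ PySem.List.pyRange 0 n 1) : 0 ≤ u ∧ u < n := by
  have := PySem.List.mem_pyRange_one.mp h
  omega

-- delta forces untouched values on nonnegative init cells (raw-index version)
lemma pvPres (capacity : List (List Int)) (init : List Int) (source n : Int) (lv : List Int)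
    (hlen : lv.length = init.length) (hd : pvDelta capacity init source n lv)
    (x : Int) (hx : 0 ≤ pvRead init x) : pvRead lv x = pvRead init x := by
  cases hidx : PySem.List.pyIdx? init.length x with
  | none => rw [pvRead_none _ _ (by rw [hlen]; exact hidx), pvRead_none _ _ hidx]
  | some k =>
      have hk := pvIdx_lt _ _ _ hidx
      rw [pvRead_some _ _ k (by rw [hlen]; exact hidx), pvRead_some _ _ k hidx]
      rcases hd k hk with h | h
      · exact h
      · exfalso
        rw [pvRead_some _ _ k hidx] at hx
        omega

-- structure of closure members
lemma pvC_elim (capacity : List (List Int)) (init : List Int) (source n : Int) (w : Int)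
    (h : pvC capacity init source n w) :
    w = source ∨ (w ∈ PySem.List.pyRange 0 n 1 ∧ pvRead init w < 0) := by
  cases h with
  | src => exact Or.inl rfl
  | step _ hu hcap hneg => exact Or.inr ⟨hu, hneg⟩


-- ---- A side: the inner for-loop as a pure function (new level, appended vertices) ----
def pvG (capacity : List (List Int)) (v : Int) : List Int → List Int → List Int × List Int
  | [], lv => (lv, [])
  | u :: us, lv =>
      if 0 < PySem.List.pyGetD (PySem.List.pyGetD capacity v []) u 0 ∧ PySem.List.pyGetD lv u 0 < 0 then
        let r := pvG capacity v us (PySem.List.pySetD lv u (PySem.List.pyGetD lv v 0 + 1))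
        (r.1, u :: r.2)
      else pvG capacity v us lv

lemma foldA (capacity : List (List Int)) (v : Int) :
    ∀ (us : List Int) (lv q : List Int),
      us.foldl (bfsStep capacity v) (lv, q) = ((pvG capacity v us lv).1, q ++ (pvG capacity v us lv).2) := by
  intro us
  induction us with
  | nil => intro lv q; simp [pvG]
  | cons u us ih =>
      intro lv q
      simp only [List.foldl_cons, bfsStep, pvG]
      split_ifs with h
      · rw [ih]; simp
      · rw [ih]

lemma loopA_nil (capacity : List (List Int)) (n : Int) : ∀ (f : Nat) (lv : List Int), bfsLoop capacity n f lv [] = lv := by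
  intro f lv; cases f <;> rfl

-- all invariants of one processed vertex, in one induction over the scanned suffix
lemma pvG_props (capacity : List (List Int)) (init : List Int) (source n v : Int)
    (hnL : n ≤ (init.length : Int)) (hCv : pvC capacity init source n v) :
    ∀ (us : List Int), (∀ u ∈ us, u ∈ PySem.List.pyRange 0 n 1) →
    ∀ (lv : List Int), lv.length = init.length → pvDelta capacity init source n lv → 0 ≤ pvRead lv v →
      (pvG capacity v us lv).1.length = init.length ∧
      pvDelta capacity init source n (pvG capacity v us lv).1 ∧
      (∀ x, 0 ≤ pvRead lv x → 0 ≤ pvRead (pvG capacity v us lv).1 x) ∧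
      (∀ w ∈ (pvG capacity v us lv).2, pvC capacity init source n w ∧ 0 ≤ pvRead (pvG capacity v us lv).1 w) ∧
      (∀ u ∈ us, 0 < pvCap capacity v u → 0 ≤ pvRead (pvG capacity v us lv).1 u) ∧
      (pvNeg (pvG capacity v us lv).1 + (pvG capacity v us lv).2.length = pvNeg lv) ∧
      (∀ x ∈ PySem.List.pyRange 0 n 1, pvRead lv x < 0 → 0 ≤ pvRead (pvG capacity v us lv).1 x → x ∈ (pvG capacity v us lv).2) := by
  intro us
  induction us with
  | nil =>
      intro _ lv hlen hd hv
      simp only [pvG]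
      exact ⟨hlen, hd, fun x hx => hx, by simp, by simp, by simp, fun x _ h1 h2 => absurd h2 (by omega)⟩
  | cons u us ih =>
      intro hus lv hlen hd hv
      have hu : u ∈ PySem.List.pyRange 0 n 1 := hus u (by simp)
      have hus' : ∀ x ∈ us, x ∈ PySem.List.pyRange 0 n 1 := fun x hx => hus x (by simp [hx])
      obtain ⟨hu0, hun⟩ := pvRange_mem n u hu
      have hkL : u.toNat < lv.length := by rw [hlen]; omega
      have hidxu : PySem.List.pyIdx? lv.length u = some u.toNat :=
        pvIdx_of_nonneg _ _ hu0 (by omega)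
      have hcastu : ((u.toNat : Nat) : Int) = u := Int.toNat_of_nonneg hu0
      by_cases hcond : 0 < PySem.List.pyGetD (PySem.List.pyGetD capacity v []) u 0 ∧ PySem.List.pyGetD lv u 0 < 0
      · -- write case
        have hreadu : pvRead lv u < 0 := hcond.2
        have hcellu : lv.getD u.toNat 0 < 0 := by
          rw [← pvRead_nat lv u.toNat hkL, hcastu]; exact hreadu
        have hinitu : init.getD u.toNat 0 < 0 := by
          rcases hd u.toNat (by omega) with h | h
          · omega
          · omega
        have hinitu' : pvRead init u < 0 := by
          rw [← hcastu, pvRead_nat init u.toNat (by omega)]; exact hinitu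
        have hCu : pvC capacity init source n u := pvC.step hCv hu hcond.1 hinitu'
        set w := PySem.List.pyGetD lv v 0 + 1 with hw
        have hw1 : 1 ≤ w := by
          have : 0 ≤ PySem.List.pyGetD lv v 0 := hv
          omega
        have hset : PySem.List.pySetD lv u w = lv.set u.toNat w := pvSet_some _ _ _ _ hidxu
        set lv2 := lv.set u.toNat w with hlv2
        have hlen2 : lv2.length = init.length := by rw [hlv2]; simp [hlen]
        have hread2 : ∀ x, pvRead lv2 x = if PySem.List.pyIdx? lv.length x = some u.toNat then w else pvRead lv x :=
          fun x => pvRead_set lv u x u.toNat w hidxu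
        have hgetD2 : ∀ j : Nat, j < init.length →
            lv2.getD j 0 = if j = u.toNat then w else lv.getD j 0 := by
          intro j hj
          exact getD_set 0 lv u.toNat j w hkL (by omega)
        have hd2 : pvDelta capacity init source n lv2 := by
          intro j hj
          rw [hgetD2 j hj]
          by_cases hj2 : j = u.toNat
          · subst hj2
            right
            refine ⟨by simp [hw1], hinitu, by rw [hcastu]; omega, by rw [hcastu]; exact hCu⟩
          · simp only [hj2, if_false]
            exact hd j hj
        have hv2 : 0 ≤ pvRead lv2 v ∧ pvRead lv2 v = pvRead lv v := by
          rw [hread2 v]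
          split_ifs with hvi
          · exfalso
            have := pvRead_some lv v u.toNat hvi
            omega
          · exact ⟨hv, rfl⟩
        have hmono2 : ∀ x, 0 ≤ pvRead lv x → 0 ≤ pvRead lv2 x := by
          intro x hx
          rw [hread2 x]
          split_ifs
          · omega
          · exact hx
        have hreadu2 : pvRead lv2 u = w := by rw [hread2 u]; simp [hidxu]
        obtain ⟨l1, d1, m1, a1, c1, n1, f1⟩ := ih hus' lv2 hlen2 hd2 hv2.1
        have hGeq : pvG capacity v (u :: us) lv
            = ((pvG capacity v us lv2).1, u :: (pvG capacity v us lv2).2) := by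
          simp only [pvG, if_pos hcond]
          rw [hset]
        rw [hGeq]
        refine ⟨l1, d1, ?_, ?_, ?_, ?_, ?_⟩
        · intro x hx; exact m1 x (hmono2 x hx)
        · intro x hx
          rcases List.mem_cons.mp hx with h | h
          · rw [h]
            exact ⟨hCu, m1 u (by rw [hreadu2]; omega)⟩
          · exact a1 x h
        · intro x hx hcap
          rcases List.mem_cons.mp hx with h | h
          · rw [h]; exact m1 u (by rw [hreadu2]; omega)
          · exact c1 x h hcap
        · have hns := pvNeg_set lv u.toNat w hkL hcellu (by omega)
          rw [← hlv2] at hns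
          simp only [List.length_cons]
          omega
        · intro x hxr hxneg hxnn
          obtain ⟨hx0, hxn⟩ := pvRange_mem n x hxr
          by_cases hxu : x = u
          · simp [hxu]
          · have hidxx : PySem.List.pyIdx? lv.length x = some x.toNat :=
              pvIdx_of_nonneg _ _ hx0 (by omega)
            have hxneq : x.toNat ≠ u.toNat := by omega
            have : pvRead lv2 x = pvRead lv x := by
              rw [hread2 x, if_neg (by rw [hidxx]; simp [hxneq])]
            right
            exact f1 x hxr (by omega) hxnn
      · -- no-write case
        have hGeq : pvG capacity v (u :: us) lv = pvG capacity v us lv := by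
          simp only [pvG, if_neg hcond]
        rw [hGeq]
        obtain ⟨l1, d1, m1, a1, c1, n1, f1⟩ := ih hus' lv hlen hd hv
        refine ⟨l1, d1, m1, a1, ?_, n1, f1⟩
        intro x hx hcap
        rcases List.mem_cons.mp hx with h | h
        · subst h
          have : ¬ pvRead lv x < 0 := by
            intro hlt
            exact hcond ⟨hcap, hlt⟩
          exact m1 x (by omega)
        · exact c1 x h hcap


-- the whole A loop: with enough fuel the queue is drained and the final state is closed
lemma pvALoop (capacity : List (List Int)) (init : List Int) (source n : Int)
    (hnL : n ≤ (init.length : Int)) (hs0 : 0 ≤ pvRead init source) :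
    ∀ (fuel : Nat) (lv q : List Int),
      lv.length = init.length → pvDelta capacity init source n lv →
      (∀ w ∈ q, pvC capacity init source n w ∧ 0 ≤ pvRead lv w) →
      (∀ w, pvC capacity init source n w → 0 ≤ pvRead lv w → w ∈ q ∨ pvClosed capacity n lv w) →
      q.length + 2 * pvNeg lv ≤ fuel →
      (bfsLoop capacity n fuel lv q).length = init.length ∧
      pvDelta capacity init source n (bfsLoop capacity n fuel lv q) ∧
      (∀ w, pvC capacity init source n w → 0 ≤ pvRead (bfsLoop capacity n fuel lv q) w →
        pvClosed capacity n (bfsLoop capacity n fuel lv q) w) := by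
  intro fuel
  induction fuel with
  | zero =>
      intro lv q hlen hd hq he hm
      have hq0 : q = [] := by
        cases q with
        | nil => rfl
        | cons a l => simp at hm
      subst hq0
      rw [loopA_nil]
      exact ⟨hlen, hd, fun w hw hr => (he w hw hr).resolve_left (by simp)⟩
  | succ fuel ih =>
      intro lv q hlen hd hq he hm
      cases q with
      | nil =>
          rw [loopA_nil]
          exact ⟨hlen, hd, fun w hw hr => (he w hw hr).resolve_left (by simp)⟩
      | cons v q =>
          obtain ⟨hCv, hv⟩ := hq v (by simp)
          obtain ⟨l1, d1, m1, a1, c1, n1, f1⟩ :=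
            pvG_props capacity init source n v hnL hCv (PySem.List.pyRange 0 n 1)
              (fun u hu => hu) lv hlen hd hv
          have hstep : bfsLoop capacity n (fuel + 1) lv (v :: q)
              = bfsLoop capacity n fuel (pvG capacity v (PySem.List.pyRange 0 n 1) lv).1
                  (q ++ (pvG capacity v (PySem.List.pyRange 0 n 1) lv).2) := by
            rw [bfsLoop, foldA]
          rw [hstep]
          apply ih
          · exact l1
          · exact d1
          · intro w hw
            rcases List.mem_append.mp hw with h | h
            · obtain ⟨h1, h2⟩ := hq w (by simp [h])
              exact ⟨h1, m1 w h2⟩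
            · exact a1 w h
          · intro w hw hr
            by_cases h0 : 0 ≤ pvRead lv w
            · rcases he w hw h0 with h | h
              · rcases List.mem_cons.mp h with h2 | h2
                · right
                  rw [h2]
                  intro u hu hcap
                  exact c1 u hu hcap
                · exact Or.inl (List.mem_append_left _ h2)
              · right
                intro u hu hcap
                exact m1 u (h u hu hcap)
            · rcases pvC_elim capacity init source n w hw with h | ⟨h2, h3⟩
              · exfalso
                rw [h, pvPres capacity init source n lv hlen hd source hs0] at h0
                exact h0 hs0
              · exact Or.inl (List.mem_append_right _ (f1 w h2 (by omega) hr))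
          · simp only [List.length_append]
            simp only [List.length_cons] at hm
            omega

-- every closure vertex is nonnegative in a closed delta-state
lemma pvComplete (capacity : List (List Int)) (init : List Int) (source n : Int)
    (f : List Int) (hlen : f.length = init.length) (hd : pvDelta capacity init source n f)
    (hs0 : 0 ≤ pvRead init source)
    (hcl : ∀ w, pvC capacity init source n w → 0 ≤ pvRead f w → pvClosed capacity n f w) :
    ∀ w, pvC capacity init source n w → 0 ≤ pvRead f w := by
  intro w h
  induction h with
  | src => rw [pvPres capacity init source n f hlen hd source hs0]; exact hs0
  | step hv hu hcap _ ihv => exact hcl _ hv ihv _ hu hcap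


-- ---- B side ----
-- innermost sweep loop: all invariants plus the change-flag accounting
lemma pvInner (capacity : List (List Int)) (init : List Int) (source n v : Int)
    (hnL : n ≤ (init.length : Int)) (hncap : n = (capacity.length : Int))
    (hCv : pvC capacity init source n v) :
    ∀ (us : List Int), (∀ u ∈ us, u ∈ PySem.List.pyRange 0 n 1) →
    ∀ (lv : List Int) (r : List Bool) (ch : Bool),
      lv.length = init.length → r.length = capacity.length →
      pvDelta capacity init source n lv → 0 ≤ pvRead lv v → pvJR init lv r →
      ∃ lv' r' ch', us.foldl (bfsAltInner capacity v) (lv, r, ch) = (lv', r', ch') ∧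
        lv'.length = init.length ∧ r'.length = capacity.length ∧
        pvDelta capacity init source n lv' ∧
        (∀ x, 0 ≤ pvRead lv x → 0 ≤ pvRead lv' x) ∧ pvJR init lv' r' ∧
        pvNeg lv' ≤ pvNeg lv ∧
        (ch' = true → ch = true ∨ pvNeg lv' < pvNeg lv) ∧
        (ch' = false → lv' = lv ∧ r' = r ∧ ch = false ∧
          ∀ u ∈ us, ¬(0 < pvCap capacity v u ∧ pvRead lv u < 0)) ∧
        (∀ u ∈ us, 0 < pvCap capacity v u → 0 ≤ pvRead lv' u) := by
  intro us
  induction us with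
  | nil =>
      intro _ lv r ch hlen hrlen hd hv hJR
      exact ⟨lv, r, ch, rfl, hlen, hrlen, hd, fun x hx => hx, hJR, le_refl _,
        fun h => Or.inl h, fun h => ⟨rfl, rfl, h, by simp⟩, by simp⟩
  | cons u us ih =>
      intro hus lv r ch hlen hrlen hd hv hJR
      have hu : u ∈ PySem.List.pyRange 0 n 1 := hus u (by simp)
      have hus' : ∀ x ∈ us, x ∈ PySem.List.pyRange 0 n 1 := fun x hx => hus x (by simp [hx])
      obtain ⟨hu0, hun⟩ := pvRange_mem n u hu
      have hkL : u.toNat < lv.length := by rw [hlen]; omega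
      have hkr : u.toNat < r.length := by rw [hrlen]; omega
      have hidxu : PySem.List.pyIdx? lv.length u = some u.toNat :=
        pvIdx_of_nonneg _ _ hu0 (by omega)
      have hcastu : ((u.toNat : Nat) : Int) = u := Int.toNat_of_nonneg hu0
      by_cases hcond : 0 < PySem.List.pyGetD (PySem.List.pyGetD capacity v []) u 0 ∧ PySem.List.pyGetD lv u 0 < 0
      · -- write case
        have hstepeq : bfsAltInner capacity v (lv, r, ch) u
            = (PySem.List.pySetD lv u (PySem.List.pyGetD lv v 0 + 1), PySem.List.pySetD r u true, true) := by
          simp only [bfsAltInner, if_pos hcond]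
        have hreadu : pvRead lv u < 0 := hcond.2
        have hcellu : lv.getD u.toNat 0 < 0 := by
          rw [← pvRead_nat lv u.toNat hkL, hcastu]; exact hreadu
        have hinitu : init.getD u.toNat 0 < 0 := by
          rcases hd u.toNat (by omega) with h | h
          · omega
          · omega
        have hinitu' : pvRead init u < 0 := by
          rw [← hcastu, pvRead_nat init u.toNat (by omega)]; exact hinitu
        have hCu : pvC capacity init source n u := pvC.step hCv hu hcond.1 hinitu'
        set w := PySem.List.pyGetD lv v 0 + 1 with hw
        have hw1 : 1 ≤ w := by
          have : 0 ≤ PySem.List.pyGetD lv v 0 := hv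
          omega
        have hset : PySem.List.pySetD lv u w = lv.set u.toNat w :=
          PySem.List.pySetD_of_nonneg _ _ hu0
        have hrset : PySem.List.pySetD r u true = r.set u.toNat true :=
          PySem.List.pySetD_of_nonneg _ _ hu0
        set lv2 := lv.set u.toNat w with hlv2
        set r2 := r.set u.toNat true with hr2
        have hlen2 : lv2.length = init.length := by rw [hlv2]; simp [hlen]
        have hrlen2 : r2.length = capacity.length := by rw [hr2]; simp [hrlen]
        have hread2 : ∀ x, pvRead lv2 x = if PySem.List.pyIdx? lv.length x = some u.toNat then w else pvRead lv x :=
          fun x => pvRead_set lv u x u.toNat w hidxu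
        have hgetD2 : ∀ j : Nat, j < init.length →
            lv2.getD j 0 = if j = u.toNat then w else lv.getD j 0 := by
          intro j hj
          exact getD_set 0 lv u.toNat j w hkL (by omega)
        have hrgetD2 : ∀ j : Nat, j < r.length →
            r2.getD j false = if j = u.toNat then true else r.getD j false := by
          intro j hj
          exact getD_set false r u.toNat j true hkr hj
        have hd2 : pvDelta capacity init source n lv2 := by
          intro j hj
          rw [hgetD2 j hj]
          by_cases hj2 : j = u.toNat
          · subst hj2
            right
            refine ⟨by simp [hw1], hinitu, by rw [hcastu]; omega, by rw [hcastu]; exact hCu⟩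
          · simp only [hj2, if_false]
            exact hd j hj
        have hJR2 : pvJR init lv2 r2 := by
          intro j hj
          rw [hrlen2] at hj
          rw [hrgetD2 j (by omega), hgetD2 j (by omega)]
          by_cases hj2 : j = u.toNat
          · subst hj2
            rw [if_pos rfl, if_pos rfl]
            constructor
            · intro _; exact ⟨hinitu, by omega⟩
            · intro _; rfl
          · simp only [hj2, if_false]
            exact hJR j (by omega)
        have hv2 : 0 ≤ pvRead lv2 v := by
          rw [hread2 v]
          split_ifs with hvi
          · omega
          · exact hv
        have hmono2 : ∀ x, 0 ≤ pvRead lv x → 0 ≤ pvRead lv2 x := by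
          intro x hx
          rw [hread2 x]
          split_ifs
          · omega
          · exact hx
        have hreadu2 : pvRead lv2 u = w := by rw [hread2 u]; simp [hidxu]
        have hns : pvNeg lv2 + 1 = pvNeg lv := by
          have := pvNeg_set lv u.toNat w hkL hcellu (by omega)
          rw [← hlv2] at this
          exact this
        obtain ⟨lv', r', ch', heq, l1, rl1, d1, m1, j1, ng1, ct1, cf1, cv1⟩ :=
          ih hus' lv2 r2 true hlen2 hrlen2 hd2 hv2 hJR2
        refine ⟨lv', r', ch', ?_, l1, rl1, d1, ?_, j1, by omega, ?_, ?_, ?_⟩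
        · rw [List.foldl_cons, hstepeq, hset, hrset]
          exact heq
        · intro x hx; exact m1 x (hmono2 x hx)
        · intro _; right; omega
        · intro h
          exact absurd (cf1 h).2.2.1 (by simp)
        · intro x hx hcap
          rcases List.mem_cons.mp hx with h | h
          · rw [h]; exact m1 u (by rw [hreadu2]; omega)
          · exact cv1 x h hcap
      · -- no-write case
        have hstepeq : bfsAltInner capacity v (lv, r, ch) u = (lv, r, ch) := by
          simp only [bfsAltInner, if_neg hcond]
        obtain ⟨lv', r', ch', heq, l1, rl1, d1, m1, j1, ng1, ct1, cf1, cv1⟩ :=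
          ih hus' lv r ch hlen hrlen hd hv hJR
        refine ⟨lv', r', ch', ?_, l1, rl1, d1, m1, j1, ng1, ct1, ?_, ?_⟩
        · rw [List.foldl_cons, hstepeq]; exact heq
        · intro h
          obtain ⟨e1, e2, e3, e4⟩ := cf1 h
          refine ⟨e1, e2, e3, ?_⟩
          intro x hx
          rcases List.mem_cons.mp hx with h2 | h2
          · rw [h2]; exact hcond
          · exact e4 x h2
        · intro x hx hcap
          rcases List.mem_cons.mp hx with h | h
          · have : ¬ pvRead lv x < 0 := by
              intro hlt
              rw [h] at hlt
              exact hcond ⟨by rw [← h]; exact hcap, hlt⟩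
            exact m1 x (by omega)
          · exact cv1 x h hcap

-- one full sweep 'for v in range(n): if reached[v]: …'
lemma pvSweep (capacity : List (List Int)) (init : List Int) (source n : Int)
    (hnL : n ≤ (init.length : Int)) (hncap : n = (capacity.length : Int)) :
    ∀ (vs : List Int), (∀ x ∈ vs, x ∈ PySem.List.pyRange 0 n 1) →
    ∀ (lv : List Int) (r : List Bool) (ch : Bool),
      lv.length = init.length → r.length = capacity.length →
      pvDelta capacity init source n lv → pvJR init lv r →
      ∃ lv' r' ch', vs.foldl (bfsAltSweep capacity n) (lv, r, ch) = (lv', r', ch') ∧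
        lv'.length = init.length ∧ r'.length = capacity.length ∧
        pvDelta capacity init source n lv' ∧
        (∀ x, 0 ≤ pvRead lv x → 0 ≤ pvRead lv' x) ∧ pvJR init lv' r' ∧
        pvNeg lv' ≤ pvNeg lv ∧
        (ch' = true → ch = true ∨ pvNeg lv' < pvNeg lv) ∧
        (ch' = false → lv' = lv ∧ r' = r ∧ ch = false ∧
          ∀ v ∈ vs, r.getD v.toNat false = true →
            ∀ u ∈ PySem.List.pyRange 0 n 1, ¬(0 < pvCap capacity v u ∧ pvRead lv u < 0)) := by
  intro vs
  induction vs with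
  | nil =>
      intro _ lv r ch hlen hrlen hd hJR
      exact ⟨lv, r, ch, rfl, hlen, hrlen, hd, fun x hx => hx, hJR, le_refl _,
        fun h => Or.inl h, fun h => ⟨rfl, rfl, h, by simp⟩⟩
  | cons v vs ih =>
      intro hvs lv r ch hlen hrlen hd hJR
      have hv : v ∈ PySem.List.pyRange 0 n 1 := hvs v (by simp)
      have hvs' : ∀ x ∈ vs, x ∈ PySem.List.pyRange 0 n 1 := fun x hx => hvs x (by simp [hx])
      obtain ⟨hv0, hvn⟩ := pvRange_mem n v hv
      have hkr : v.toNat < r.length := by rw [hrlen]; omega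
      have hcastv : ((v.toNat : Nat) : Int) = v := Int.toNat_of_nonneg hv0
      have hguard : PySem.List.pyGetD r v false = r.getD v.toNat false :=
        PySem.List.pyGetD_of_nonneg _ _ hv0
      by_cases hrv : r.getD v.toNat false = true
      · -- reached vertex: run the inner loop
        have hJv := (hJR v.toNat (by rw [hrlen]; omega)).mp hrv
        have hCv : pvC capacity init source n v := by
          rcases hd v.toNat (by omega) with h | h
          · exfalso; omega
          · rw [hcastv] at h; exact h.2.2.2
        have hvread : 0 ≤ pvRead lv v := by
          rw [← hcastv, pvRead_nat lv v.toNat (by rw [hlen]; omega)]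
          exact hJv.2
        have hsweq : bfsAltSweep capacity n (lv, r, ch) v
            = (PySem.List.pyRange 0 n 1).foldl (bfsAltInner capacity v) (lv, r, ch) := by
          simp only [bfsAltSweep, hguard, hrv, if_pos]
        obtain ⟨lv1, r1, ch1, heq1, l1, rl1, d1, m1, j1, ng1, ct1, cf1, _⟩ :=
          pvInner capacity init source n v hnL hncap hCv (PySem.List.pyRange 0 n 1)
            (fun u hu => hu) lv r ch hlen hrlen hd hvread hJR
        obtain ⟨lv', r', ch', heq2, l2, rl2, d2, m2, j2, ng2, ct2, cf2⟩ :=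
          ih hvs' lv1 r1 ch1 l1 rl1 d1 j1
        refine ⟨lv', r', ch', ?_, l2, rl2, d2, ?_, j2, by omega, ?_, ?_⟩
        · rw [List.foldl_cons, hsweq, heq1]; exact heq2
        · intro x hx; exact m2 x (m1 x hx)
        · intro h
          rcases ct2 h with h2 | h2
          · rcases ct1 h2 with h3 | h3
            · exact Or.inl h3
            · exact Or.inr (by omega)
          · exact Or.inr (by omega)
        · intro h
          obtain ⟨e1, e2, e3, e4⟩ := cf2 h
          obtain ⟨f1, f2, f3, f4⟩ := cf1 e3
          subst f1; subst f2
          refine ⟨e1, e2, f3, ?_⟩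
          intro x hx hrx
          rcases List.mem_cons.mp hx with h2 | h2
          · rw [h2]; exact f4
          · exact e4 x h2 hrx
      · -- unreached vertex: skip
        have hsweq : bfsAltSweep capacity n (lv, r, ch) v = (lv, r, ch) := by
          simp only [bfsAltSweep, hguard, hrv]
          simp
        obtain ⟨lv', r', ch', heq, l1, rl1, d1, m1, j1, ng1, ct1, cf1⟩ :=
          ih hvs' lv r ch hlen hrlen hd hJR
        refine ⟨lv', r', ch', ?_, l1, rl1, d1, m1, j1, ng1, ct1, ?_⟩
        · rw [List.foldl_cons, hsweq]; exact heq
        · intro h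
          obtain ⟨e1, e2, e3, e4⟩ := cf1 h
          refine ⟨e1, e2, e3, ?_⟩
          intro x hx hrx
          rcases List.mem_cons.mp hx with h2 | h2
          · exfalso; rw [h2] at hrx; exact hrv hrx
          · exact e4 x h2 hrx

-- the whole B loop: saturation terminates within the fuel and ends in a closed fixpoint
lemma pvBLoop (capacity : List (List Int)) (init : List Int) (source n : Int)
    (hnL : n ≤ (init.length : Int)) (hncap : n = (capacity.length : Int)) :
    ∀ (fuel : Nat) (lv : List Int) (r : List Bool),
      lv.length = init.length → r.length = capacity.length →
      pvDelta capacity init source n lv → pvJR init lv r →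
      pvNeg lv < fuel →
      (bfsAltLoop capacity n fuel lv r).length = init.length ∧
      pvDelta capacity init source n (bfsAltLoop capacity n fuel lv r) ∧
      (∀ x, 0 ≤ pvRead lv x → 0 ≤ pvRead (bfsAltLoop capacity n fuel lv r) x) ∧
      (∀ v ∈ PySem.List.pyRange 0 n 1, init.getD v.toNat 0 < 0 →
        0 ≤ (bfsAltLoop capacity n fuel lv r).getD v.toNat 0 →
        pvClosed capacity n (bfsAltLoop capacity n fuel lv r) v) := by
  intro fuel
  induction fuel with
  | zero => intro lv r _ _ _ _ hm; omega
  | succ fuel ih =>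
      intro lv r hlen hrlen hd hJR hm
      obtain ⟨lv1, r1, ch1, heq, l1, rl1, d1, m1, j1, ng1, ct1, cf1⟩ :=
        pvSweep capacity init source n hnL hncap (PySem.List.pyRange 0 n 1)
          (fun x hx => hx) lv r false hlen hrlen hd hJR
      have hstep : bfsAltLoop capacity n (fuel + 1) lv r
          = if ch1 then bfsAltLoop capacity n fuel lv1 r1 else lv1 := by
        rw [bfsAltLoop]
        rw [heq]
      cases hch : ch1 with
      | true =>
          have hlt : pvNeg lv1 < pvNeg lv := by
            rcases ct1 hch with h | h
            · simp at h
            · exact h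
          rw [hstep, hch, if_pos rfl]
          obtain ⟨g1, g2, g3, g4⟩ := ih lv1 r1 l1 rl1 d1 j1 (by omega)
          exact ⟨g1, g2, fun x hx => g3 x (m1 x hx), g4⟩
      | false =>
          obtain ⟨e1, e2, _, e4⟩ := cf1 hch
          rw [hstep, hch, if_neg (by simp)]
          subst e1
          refine ⟨l1, d1, fun x hx => hx, ?_⟩
          intro v hv hvneg hvnn
          obtain ⟨hv0, hvn⟩ := pvRange_mem n v hv
          have hrv : r1.getD v.toNat false = true :=
            (j1 v.toNat (by rw [rl1]; omega)).mpr ⟨hvneg, hvnn⟩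
          rw [e2] at hrv
          have hfix := e4 v hv hrv
          intro u hu hcap
          have := hfix u hu
          by_cases hru : pvRead lv1 u < 0
          · exact absurd ⟨hcap, hru⟩ this
          · omega

-- the seed pass: invariants established from the freshly written start state
lemma pvSeedLem (capacity : List (List Int)) (init : List Int) (source n : Int)
    (hnL : n ≤ (init.length : Int)) (hncap : n = (capacity.length : Int))
    (hs0 : 0 ≤ pvRead init source) :
    ∀ (us : List Int), (∀ u ∈ us, u ∈ PySem.List.pyRange 0 n 1) →
    ∀ (lv : List Int) (r : List Bool),
      lv.length = init.length → r.length = capacity.length →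
      pvDelta capacity init source n lv → pvJR init lv r →
      ∃ lv' r', us.foldl (bfsAltSeed capacity source) (lv, r) = (lv', r') ∧
        lv'.length = init.length ∧ r'.length = capacity.length ∧
        pvDelta capacity init source n lv' ∧
        (∀ x, 0 ≤ pvRead lv x → 0 ≤ pvRead lv' x) ∧ pvJR init lv' r' ∧
        (∀ u ∈ us, 0 < pvCap capacity source u → 0 ≤ pvRead lv' u) := by
  intro us
  induction us with
  | nil =>
      intro _ lv r hlen hrlen hd hJR
      exact ⟨lv, r, rfl, hlen, hrlen, hd, fun x hx => hx, hJR, by simp⟩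
  | cons u us ih =>
      intro hus lv r hlen hrlen hd hJR
      have hu : u ∈ PySem.List.pyRange 0 n 1 := hus u (by simp)
      have hus' : ∀ x ∈ us, x ∈ PySem.List.pyRange 0 n 1 := fun x hx => hus x (by simp [hx])
      obtain ⟨hu0, hun⟩ := pvRange_mem n u hu
      have hkL : u.toNat < lv.length := by rw [hlen]; omega
      have hkr : u.toNat < r.length := by rw [hrlen]; omega
      have hidxu : PySem.List.pyIdx? lv.length u = some u.toNat :=
        pvIdx_of_nonneg _ _ hu0 (by omega)
      have hcastu : ((u.toNat : Nat) : Int) = u := Int.toNat_of_nonneg hu0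
      have hv : 0 ≤ pvRead lv source := by
        rw [pvPres capacity init source n lv hlen hd source hs0]; exact hs0
      by_cases hcond : 0 < PySem.List.pyGetD (PySem.List.pyGetD capacity source []) u 0 ∧ PySem.List.pyGetD lv u 0 < 0
      · have hstepeq : bfsAltSeed capacity source (lv, r) u
            = (PySem.List.pySetD lv u (PySem.List.pyGetD lv source 0 + 1), PySem.List.pySetD r u true) := by
          simp only [bfsAltSeed, if_pos hcond]
        have hreadu : pvRead lv u < 0 := hcond.2
        have hcellu : lv.getD u.toNat 0 < 0 := by
          rw [← pvRead_nat lv u.toNat hkL, hcastu]; exact hreadu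
        have hinitu : init.getD u.toNat 0 < 0 := by
          rcases hd u.toNat (by omega) with h | h
          · omega
          · omega
        have hinitu' : pvRead init u < 0 := by
          rw [← hcastu, pvRead_nat init u.toNat (by omega)]; exact hinitu
        have hCu : pvC capacity init source n u := pvC.step pvC.src hu hcond.1 hinitu'
        set w := PySem.List.pyGetD lv source 0 + 1 with hw
        have hw1 : 1 ≤ w := by
          have : 0 ≤ PySem.List.pyGetD lv source 0 := hv
          omega
        have hset : PySem.List.pySetD lv u w = lv.set u.toNat w :=
          PySem.List.pySetD_of_nonneg _ _ hu0
        have hrset : PySem.List.pySetD r u true = r.set u.toNat true :=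
          PySem.List.pySetD_of_nonneg _ _ hu0
        set lv2 := lv.set u.toNat w with hlv2
        set r2 := r.set u.toNat true with hr2
        have hlen2 : lv2.length = init.length := by rw [hlv2]; simp [hlen]
        have hrlen2 : r2.length = capacity.length := by rw [hr2]; simp [hrlen]
        have hread2 : ∀ x, pvRead lv2 x = if PySem.List.pyIdx? lv.length x = some u.toNat then w else pvRead lv x :=
          fun x => pvRead_set lv u x u.toNat w hidxu
        have hgetD2 : ∀ j : Nat, j < init.length →
            lv2.getD j 0 = if j = u.toNat then w else lv.getD j 0 := by
          intro j hj
          exact getD_set 0 lv u.toNat j w hkL (by omega)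
        have hrgetD2 : ∀ j : Nat, j < r.length →
            r2.getD j false = if j = u.toNat then true else r.getD j false := by
          intro j hj
          exact getD_set false r u.toNat j true hkr hj
        have hd2 : pvDelta capacity init source n lv2 := by
          intro j hj
          rw [hgetD2 j hj]
          by_cases hj2 : j = u.toNat
          · subst hj2
            right
            refine ⟨by simp [hw1], hinitu, by rw [hcastu]; omega, by rw [hcastu]; exact hCu⟩
          · simp only [hj2, if_false]
            exact hd j hj
        have hJR2 : pvJR init lv2 r2 := by
          intro j hj
          rw [hrlen2] at hj
          rw [hrgetD2 j (by omega), hgetD2 j (by omega)]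
          by_cases hj2 : j = u.toNat
          · subst hj2
            rw [if_pos rfl, if_pos rfl]
            constructor
            · intro _; exact ⟨hinitu, by omega⟩
            · intro _; rfl
          · simp only [hj2, if_false]
            exact hJR j (by omega)
        have hmono2 : ∀ x, 0 ≤ pvRead lv x → 0 ≤ pvRead lv2 x := by
          intro x hx
          rw [hread2 x]
          split_ifs
          · omega
          · exact hx
        have hreadu2 : pvRead lv2 u = w := by rw [hread2 u]; simp [hidxu]
        obtain ⟨lv', r', heq, l1, rl1, d1, m1, j1, cv1⟩ :=
          ih hus' lv2 r2 hlen2 hrlen2 hd2 hJR2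
        refine ⟨lv', r', ?_, l1, rl1, d1, ?_, j1, ?_⟩
        · rw [List.foldl_cons, hstepeq, hset, hrset]
          exact heq
        · intro x hx; exact m1 x (hmono2 x hx)
        · intro x hx hcap
          rcases List.mem_cons.mp hx with h | h
          · rw [h]; exact m1 u (by rw [hreadu2]; omega)
          · exact cv1 x h hcap
      · have hstepeq : bfsAltSeed capacity source (lv, r) u = (lv, r) := by
          simp only [bfsAltSeed, if_neg hcond]
        obtain ⟨lv', r', heq, l1, rl1, d1, m1, j1, cv1⟩ :=
          ih hus' lv r hlen hrlen hd hJR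
        refine ⟨lv', r', ?_, l1, rl1, d1, m1, j1, ?_⟩
        · rw [List.foldl_cons, hstepeq]; exact heq
        · intro x hx hcap
          rcases List.mem_cons.mp hx with h | h
          · have : ¬ pvRead lv x < 0 := by
              intro hlt
              rw [h] at hlt
              exact hcond ⟨by rw [← h]; exact hcap, hlt⟩
            exact m1 x (by omega)
          · exact cv1 x h hcap

-- every closure vertex is nonnegative in B's final state
lemma pvCompleteB (capacity : List (List Int)) (init : List Int) (source n : Int)
    (hnL : n ≤ (init.length : Int))
    (f : List Int) (hlen : f.length = init.length) (hd : pvDelta capacity init source n f)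
    (hs0 : 0 ≤ pvRead init source)
    (hcov : ∀ u ∈ PySem.List.pyRange 0 n 1, 0 < pvCap capacity source u → 0 ≤ pvRead f u)
    (hcl : ∀ v ∈ PySem.List.pyRange 0 n 1, init.getD v.toNat 0 < 0 → 0 ≤ f.getD v.toNat 0 →
      pvClosed capacity n f v) :
    ∀ w, pvC capacity init source n w → 0 ≤ pvRead f w := by
  intro w h
  induction h with
  | src => rw [pvPres capacity init source n f hlen hd source hs0]; exact hs0
  | @step v u hv hu hcap _ ihv =>
      rcases pvC_elim capacity init source n v hv with h | ⟨h2, h3⟩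
      · subst h
        exact hcov u hu hcap
      · obtain ⟨hv0, hvn⟩ := pvRange_mem n v h2
        have hcastv : ((v.toNat : Nat) : Int) = v := Int.toNat_of_nonneg hv0
        have hvL : v.toNat < init.length := by omega
        have hvneg : init.getD v.toNat 0 < 0 := by
          rw [← pvRead_nat init v.toNat hvL, hcastv]; exact h3
        have hvnn : 0 ≤ f.getD v.toNat 0 := by
          rw [← pvRead_nat f v.toNat (by omega), hcastv]; exact ihv
        exact hcl v h2 hvneg hvnn u hu hcap

-- two closed delta-states decide 'level[sink] != -1' identically
lemma pvFinal (capacity : List (List Int)) (init : List Int) (source n : Int)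
    (f g : List Int) (hfl : f.length = init.length) (hgl : g.length = init.length)
    (hdf : pvDelta capacity init source n f) (hdg : pvDelta capacity init source n g)
    (hcf : ∀ w, pvC capacity init source n w → 0 ≤ pvRead f w)
    (hcg : ∀ w, pvC capacity init source n w → 0 ≤ pvRead g w) (sink : Int) :
    decide (pvRead f sink ≠ -1) = decide (pvRead g sink ≠ -1) := by
  cases hidx : PySem.List.pyIdx? init.length sink with
  | none =>
      rw [pvRead_none f sink (by rw [hfl]; exact hidx), pvRead_none g sink (by rw [hgl]; exact hidx)]
  | some k =>
      have hk := pvIdx_lt _ _ _ hidx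
      rw [pvRead_some f sink k (by rw [hfl]; exact hidx), pvRead_some g sink k (by rw [hgl]; exact hidx)]
      by_cases h0 : 0 ≤ init.getD k 0
      · have hf : f.getD k 0 = init.getD k 0 := by
          rcases hdf k hk with h | h
          · exact h
          · omega
        have hg : g.getD k 0 = init.getD k 0 := by
          rcases hdg k hk with h | h
          · exact h
          · omega
        rw [hf, hg]
      · by_cases hC : (k : Int) < n ∧ pvC capacity init source n (k : Int)
        · have hf : 1 ≤ f.getD k 0 := by
            have := hcf (k : Int) hC.2
            rw [pvRead_nat f k (by omega)] at this
            rcases hdf k hk with h | h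
            · omega
            · omega
          have hg : 1 ≤ g.getD k 0 := by
            have := hcg (k : Int) hC.2
            rw [pvRead_nat g k (by omega)] at this
            rcases hdg k hk with h | h
            · omega
            · omega
          simp only [ne_eq, decide_not]
          rw [decide_eq_false (by omega), decide_eq_false (by omega)]
        · have hf : f.getD k 0 = init.getD k 0 := by
            rcases hdf k hk with h | h
            · exact h
            · exact absurd ⟨h.2.2.1, h.2.2.2⟩ hC
          have hg : g.getD k 0 = init.getD k 0 := by
            rcases hdg k hk with h | h
            · exact h
            · exact absurd ⟨h.2.2.1, h.2.2.2⟩ hC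
          rw [hf, hg]
lemma getD_replicate_false (m j : Nat) : (List.replicate m false).getD j false = false := by
  rw [List.getD_eq_getElem?_getD, List.getElem?_replicate]
  split_ifs <;> rfl

-- ===== VERDICT (by name: the statement is the Claim_ definition above) =====
theorem bfs_spec : Claim_equal_bfs := by
  intro source sink level capacity _ hpre
  obtain ⟨hnl, _hrows, _hsrc, _hsnk, _hsrcn⟩ := hpre
  unfold Spec_bfs
  set init := PySem.List.pySetD level source 0 with hinit
  have hinitlen : init.length = level.length := length_setD level source 0
  set n : Int := (capacity.length : Int) with hn
  have hnL : n ≤ (init.length : Int) := by rw [hinitlen, hn]; exact_mod_cast hnl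
  have hs0 : 0 ≤ pvRead init source := by rw [hinit, pvRead_setD_self]
  have hnegle : pvNeg init ≤ level.length := by
    have h := List.countP_le_length (p := fun a : Int => decide (a < 0)) (l := init)
    rw [hinitlen] at h
    exact h
  -- A side: drain the queue, then close and complete
  obtain ⟨hlA, hdA, hclA⟩ :=
    pvALoop capacity init source n hnL hs0 (2 * level.length + 2) init [source]
      rfl (fun k _ => Or.inl rfl)
      (by intro w hw
          simp only [List.mem_singleton] at hw
          subst hw
          exact ⟨pvC.src, hs0⟩)
      (by intro w hw hr
          rcases pvC_elim capacity init source n w hw with h | ⟨_, h3⟩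
          · exact Or.inl (by simp [h])
          · exfalso; omega)
      (by simp only [List.length_singleton]; omega)
  have hcfA := pvComplete capacity init source n
    (bfsLoop capacity n (2 * level.length + 2) init [source]) hlA hdA hs0 hclA
  -- B side: seed, saturate, then close and complete
  obtain ⟨lv1, r1, hseedeq, hl1, hrl1, hd1, _hm1, hJ1, hcov1⟩ :=
    pvSeedLem capacity init source n hnL hn hs0 (PySem.List.pyRange 0 n 1)
      (fun u hu => hu) init (List.replicate capacity.length false)
      rfl (List.length_replicate) (fun k _ => Or.inl rfl)
      (by intro j hj
          rw [getD_replicate_false]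
          constructor
          · intro h; exact absurd h (by simp)
          · intro ⟨a, b⟩; exact absurd a (by omega))
  have hneg1 : pvNeg lv1 < level.length + 2 := by
    have h := List.countP_le_length (p := fun a : Int => decide (a < 0)) (l := lv1)
    rw [hl1, hinitlen] at h
    unfold pvNeg
    omega
  obtain ⟨hlB, hdB, hmB, hclB⟩ :=
    pvBLoop capacity init source n hnL hn (level.length + 2) lv1 r1 hl1 hrl1 hd1 hJ1 hneg1
  have hcovB : ∀ u ∈ PySem.List.pyRange 0 n 1, 0 < pvCap capacity source u →
      0 ≤ pvRead (bfsAltLoop capacity n (level.length + 2) lv1 r1) u :=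
    fun u hu hc => hmB u (hcov1 u hu hc)
  have hcgB := pvCompleteB capacity init source n hnL
    (bfsAltLoop capacity n (level.length + 2) lv1 r1) hlB hdB hs0 hcovB hclB
  -- assemble the two return values
  show (decide (PySem.List.pyGetD (bfsLoop capacity ((capacity.length : Nat) : Int) (2 * level.length + 2)
          (PySem.List.pySetD level source 0) [source]) sink 0 ≠ -1))
      = (decide (PySem.List.pyGetD (bfsAltLoop capacity ((capacity.length : Nat) : Int) (level.length + 2)
          ((PySem.List.pyRange 0 ((capacity.length : Nat) : Int) 1).foldl (bfsAltSeed capacity source)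
            (PySem.List.pySetD level source 0, List.replicate capacity.length false)).1
          ((PySem.List.pyRange 0 ((capacity.length : Nat) : Int) 1).foldl (bfsAltSeed capacity source)
            (PySem.List.pySetD level source 0, List.replicate capacity.length false)).2) sink 0 ≠ -1))
  rw [← hinit, ← hn, hseedeq]
  exact pvFinal capacity init source n _ _ hlA hlB hdA hdB hcfA hcgB sink
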